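-- pv_equiv track=rewrite | github.com/reo11/AtCoder | atcoder/ABC/abc101-200/abc164/d.py | cnt_multiple
-- ===== SOURCE A (Python) =====
-- from collections import defaultdict
--
-- def cnt_multiple(s, p):
--     # ABC158E, ABC164D
--     n = len(s)
--     if p != 2 and p != 5:
--         a = []
--         t = 1
--         for i in range(n - 1, -1, -1):
--             a.append((ord(s[i]) - ord("0")) * t % p)
--             t = t * 10 % p
--         cum = [0]
--         for v in a:
--             cum.append((cum[-1] + v) % p)
--
--         dic = defaultdict(int)
--         ans = 0
--         for v in cum:
--             ans += dic[v]
--             dic[v] += 1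
--         return ans
--     elif p == 2:
--         ans = 0
--         for i in range(n):
--             if (ord(s[i]) - ord("0")) % 2 == 0:
--                 ans += i + 1
--         return ans
--     else:
--         ans = 0
--         for i in range(n):
--             if (ord(s[i]) - ord("0")) % 5 == 0:
--                 ans += i + 1
--         return ans
-- ===== SOURCE B (Python) =====
-- def cnt_multiple(s, p):
--     if p == 2 or p == 5:
--         return sum(i + 1 for i, ch in enumerate(s) if (ord(ch) - 48) % p == 0)
--     # suffix remainders (empty suffix included), then SORT and count equal runs:
--     # each run of length c contributes c*(c-1)//2 pairs; no dictionary at all.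
--     rems = [0]
--     r, t = 0, 1
--     for ch in reversed(s):
--         r = (r + (ord(ch) - 48) * t) % p
--         t = t * 10 % p
--         rems.append(r)
--     rems.sort()
--     ans, run, prev = 0, 1, rems[0]
--     for x in rems[1:]:
--         if x == prev:
--             run += 1
--         else:
--             ans += run * (run - 1) // 2
--             run = 1
--         prev = x
--     return ans + run * (run - 1) // 2
-- ===== Notes on version B (the rewrite author's own statement) =====
-- stated objective: alternative
-- what changed: B drops A's dictionary-based incremental pair counting entirely: it computes the suffix remainders in one right-to-left pass, SORTS them, and counts equal-remainder pairs by scanning runs of the sorted list, adding run*(run-1)//2 per run (sort-then-scan instead of hash counting).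
import Mathlib
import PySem

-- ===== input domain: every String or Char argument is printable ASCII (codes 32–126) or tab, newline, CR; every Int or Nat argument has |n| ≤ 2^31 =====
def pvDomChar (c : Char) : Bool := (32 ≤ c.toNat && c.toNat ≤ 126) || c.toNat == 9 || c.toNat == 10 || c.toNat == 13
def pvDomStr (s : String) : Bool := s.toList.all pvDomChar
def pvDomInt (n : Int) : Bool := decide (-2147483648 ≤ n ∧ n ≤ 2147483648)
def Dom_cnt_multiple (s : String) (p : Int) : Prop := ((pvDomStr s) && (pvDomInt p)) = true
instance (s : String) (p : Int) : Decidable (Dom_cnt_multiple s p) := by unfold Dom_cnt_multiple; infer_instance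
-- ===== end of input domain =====

-- B drops A's dictionary-based incremental pair counting: it sorts the suffix remainders and
-- counts equal-remainder pairs by scanning runs of the sorted list (sort-then-scan, no dict).

-- ===== PORT A =====
def cnt_multiple (s : String) (p : Int) : Int :=
  let cs := s.toList
  let n : Int := PySem.Str.len s
  if ¬p = 2 ∧ ¬p = 5 then
    -- a = []; t = 1; for i in range(n-1,-1,-1): a.append((ord(s[i])-48)*t % p); t = t*10 % p
    let at1 := (PySem.List.pyRange (n - 1) (-1) (-1)).foldl
      (fun (st : List Int × Int) i =>
        (st.1 ++ [PySem.Int.mod ((((PySem.List.pyGetD cs i ' ').toNat : Int) - 48) * st.2) p],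
         PySem.Int.mod (st.2 * 10) p))
      ([], 1)
    -- cum = [0]; for v in a: cum.append((cum[-1] + v) % p)
    let cum := at1.1.foldl
      (fun (c : List Int) v => c ++ [PySem.Int.mod (PySem.List.pyGetD c (-1) 0 + v) p]) [0]
    -- dic = defaultdict(int); ans = 0; for v in cum: ans += dic[v]; dic[v] += 1
    let ad := cum.foldl
      (fun (st : Int × PySem.Dict Int Int) v =>
        (st.1 + st.2.getD v 0, st.2.modify v 0 (· + 1)))
      (0, PySem.Dict.empty)
    ad.1
  else if p = 2 then
    (PySem.List.pyRange 0 n 1).foldl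
      (fun ans i =>
        if PySem.Int.mod (((PySem.List.pyGetD cs i ' ').toNat : Int) - 48) 2 = 0 then ans + (i + 1)
        else ans) 0
  else
    (PySem.List.pyRange 0 n 1).foldl
      (fun ans i =>
        if PySem.Int.mod (((PySem.List.pyGetD cs i ' ').toNat : Int) - 48) 5 = 0 then ans + (i + 1)
        else ans) 0

-- ===== PORT B =====
def cnt_multiple_alt (s : String) (p : Int) : Int :=
  if p = 2 ∨ p = 5 then
    -- sum(i + 1 for i, ch in enumerate(s) if (ord(ch) - 48) % p == 0)
    (((PySem.List.enumerate s.toList).filter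
        (fun q => decide (PySem.Int.mod ((q.2.toNat : Int) - 48) p = 0))).map
      (fun q => q.1 + 1)).sum
  else
    -- rems = [0]; r, t = 0, 1
    -- for ch in reversed(s): r = (r + (ord(ch)-48)*t) % p; t = t*10 % p; rems.append(r)
    let st := s.toList.reverse.foldl
      (fun (st : List Int × Int × Int) ch =>
        let r := PySem.Int.mod (st.2.1 + ((ch.toNat : Int) - 48) * st.2.2) p
        (st.1 ++ [r], r, PySem.Int.mod (st.2.2 * 10) p))
      ([0], 0, 1)
    -- rems.sort()
    let rems := PySem.List.sorted st.1 (fun x => x) false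
    -- ans, run, prev = 0, 1, rems[0]   (rems is never empty: it starts as [0]);
    -- for x in rems[1:]: if x == prev: run += 1 else: ans += run*(run-1)//2; run = 1; prev = x
    let fin := (rems.drop 1).foldl
      (fun (st : Int × Int × Int) x =>
        if x = st.2.2 then (st.1, st.2.1 + 1, st.2.2)
        else (st.1 + PySem.Int.floordiv (st.2.1 * (st.2.1 - 1)) 2, 1, x))
      (0, 1, PySem.List.pyGetD rems 0 0)
    -- return ans + run*(run-1)//2
    fin.1 + PySem.Int.floordiv (fin.2.1 * (fin.2.1 - 1)) 2

-- ===== PRECONDITION & SPEC =====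
-- A raises ZeroDivisionError exactly when p = 0 and s is nonempty (the general branch takes % p);
-- on (s = "", p = 0) the loops are empty and A returns 0 normally, so that input stays inside Pre_.
def Pre_cnt_multiple (s : String) (p : Int) : Prop := p ≠ 0 ∨ s.toList = []
instance (s : String) (p : Int) : Decidable (Pre_cnt_multiple s p) := by
  unfold Pre_cnt_multiple; infer_instance

def pvWitness_cnt_multiple : String × Int := ("3543", 3)

def Spec_cnt_multiple (s : String) (p : Int) (out : Int) : Prop := out = cnt_multiple_alt s p
instance (s : String) (p : Int) (out : Int) : Decidable (Spec_cnt_multiple s p out) := by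
  unfold Spec_cnt_multiple; infer_instance

-- ===== CLAIM (what is proved, stated in full; the proofs are below) =====
def Claim_equal_cnt_multiple : Prop := ∀ (s : String) (p : Int), Dom_cnt_multiple s p →
  Pre_cnt_multiple s p → Spec_cnt_multiple s p (cnt_multiple s p)

-- ===== LEMMAS AND PROOFS =====

-- C(c,2) as both programs compute it
def pvC (c : Int) : Int := PySem.Int.floordiv (c * (c - 1)) 2

-- `a.append(... * t % p)` loop of A, written structurally
def pvAL (p : Int) : List Int → Int → List Int
  | [], _ => []
  | d :: ds, t => PySem.Int.mod (d * t) p :: pvAL p ds (PySem.Int.mod (t * 10) p)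

-- the running-remainder sequence, written structurally
def pvRL (p : Int) : Int → Int → List Int → List Int
  | _, _, [] => []
  | r, t, d :: ds =>
    PySem.Int.mod (r + d * t) p :: pvRL p (PySem.Int.mod (r + d * t) p) (PySem.Int.mod (t * 10) p) ds

-- A's cumulative-sum list tail, written structurally
def pvCL (p : Int) : Int → List Int → List Int
  | _, [] => []
  | c, v :: vs => PySem.Int.mod (c + v) p :: pvCL p (PySem.Int.mod (c + v) p) vs

-- the loop bodies of A's digit loop and B's remainder loop, as functions of the digit value
def pvStepA (p : Int) (st : List Int × Int) (d : Int) : List Int × Int :=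
  (st.1 ++ [PySem.Int.mod (d * st.2) p], PySem.Int.mod (st.2 * 10) p)

def pvStepR (p : Int) (st : List Int × Int × Int) (d : Int) : List Int × Int × Int :=
  let r := PySem.Int.mod (st.2.1 + d * st.2.2) p
  (st.1 ++ [r], r, PySem.Int.mod (st.2.2 * 10) p)

-- B's run-scan loop body
def pvStepS (st : Int × Int × Int) (x : Int) : Int × Int × Int :=
  if x = st.2.2 then (st.1, st.2.1 + 1, st.2.2)
  else (st.1 + pvC st.2.1, 1, x)

def pvDig (ch : Char) : Int := (ch.toNat : Int) - 48

theorem pvAL_foldl (p : Int) (ds : List Int) : ∀ (l0 : List Int) (t : Int),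
    (ds.foldl (pvStepA p) (l0, t)).1 = l0 ++ pvAL p ds t := by
  induction ds with
  | nil => intro l0 t; simp [pvAL]
  | cons d ds ih => intro l0 t; simp [pvAL, pvStepA, ih]

theorem pvRems_foldl (p : Int) (ds : List Int) : ∀ (l0 : List Int) (r t : Int),
    (ds.foldl (pvStepR p) (l0, r, t)).1 = l0 ++ pvRL p r t ds := by
  induction ds with
  | nil => intro l0 r t; simp [pvRL]
  | cons d ds ih => intro l0 r t; simp [pvRL, pvStepR, ih]

theorem pvGetD_last (xs : List Int) (x d : Int) :
    PySem.List.pyGetD (xs ++ [x]) (-1) d = x := by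
  simp [PySem.List.pyGetD]

theorem pvCL_foldl (p : Int) (a : List Int) : ∀ (cpre : List Int) (c0 : Int),
    a.foldl (fun (c : List Int) v => c ++ [PySem.Int.mod (PySem.List.pyGetD c (-1) 0 + v) p])
      (cpre ++ [c0])
    = cpre ++ c0 :: pvCL p c0 a := by
  induction a with
  | nil => intro cpre c0; simp [pvCL]
  | cons v vs ih =>
    intro cpre c0
    simp only [List.foldl_cons, pvGetD_last]
    have := ih (cpre ++ [c0]) (PySem.Int.mod (c0 + v) p)
    simpa [pvCL] using this

theorem pvCL_aL (p : Int) (ds : List Int) : ∀ (r t : Int),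
    pvCL p r (pvAL p ds t) = pvRL p r t ds := by
  induction ds with
  | nil => intro r t; simp [pvAL, pvRL, pvCL]
  | cons d ds ih =>
    intro r t
    simp only [pvAL, pvRL, pvCL]
    have h : PySem.Int.mod (r + PySem.Int.mod (d * t) p) p = PySem.Int.mod (r + d * t) p :=
      Int.add_fmod_fmod r (d * t) p
    rw [h, ih]

-- second component of A's counting loop is the modify-fold
theorem pvA_snd (l : List Int) : ∀ (a : Int) (d : PySem.Dict Int Int),
    (l.foldl (fun (st : Int × PySem.Dict Int Int) v =>
      (st.1 + st.2.getD v 0, st.2.modify v 0 (· + 1))) (a, d)).2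
    = l.foldl (fun d v => d.modify v 0 (· + 1)) d := by
  induction l with
  | nil => intro a d; rfl
  | cons v vs ih => intro a d; simp only [List.foldl_cons]; rw [ih]

theorem pvComb_succ (c : Int) :
    PySem.Int.floordiv ((c + 1) * c) 2 = PySem.Int.floordiv (c * (c - 1)) 2 + c := by
  rw [PySem.Int.floordiv_eq_ediv_of_pos (by norm_num),
      PySem.Int.floordiv_eq_ediv_of_pos (by norm_num)]
  have h : (c + 1) * c = c * (c - 1) + c * 2 := by ring
  rw [h, Int.add_mul_ediv_right _ _ (by norm_num : (2:Int) ≠ 0)]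

theorem pvSum_map_update (v : Int) (f g : Int → Int) : ∀ (xs : List Int), xs.Nodup → v ∈ xs →
    (∀ k ∈ xs, k ≠ v → f k = g k) →
    (xs.map f).sum = (xs.map g).sum + (f v - g v) := by
  intro xs
  induction xs with
  | nil => intro _ hv; simp at hv
  | cons x xs ih =>
    intro hnd hv hfg
    rcases List.mem_cons.mp hv with h | h
    · subst h
      have : (xs.map f) = xs.map g := by
        apply List.map_congr_left
        intro k hk
        exact hfg k (List.mem_cons_of_mem _ hk)
          (fun hkv => (List.nodup_cons.mp hnd).1 (hkv ▸ hk))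
      simp [this]; ring
    · have hx : f x = g x :=
        hfg x (List.mem_cons_self) (fun hxv => (List.nodup_cons.mp hnd).1 (hxv ▸ h))
      have := ih (List.nodup_cons.mp hnd).2 h
        (fun k hk hkv => hfg k (List.mem_cons_of_mem _ hk) hkv)
      simp only [List.map_cons, List.sum_cons, this, hx]; ring

-- the combinatorial pair sum of a list of values
def pvS (l : List Int) : Int :=
  ((PySem.Set.ofList l).map (fun k => pvC (l.count k : Int))).sum

theorem pvS_snoc (l : List Int) (v : Int) : pvS (l ++ [v]) = pvS l + (l.count v : Int) := by
  unfold pvS pvC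
  have hset : PySem.Set.ofList (l ++ [v]) = PySem.Set.add (PySem.Set.ofList l) v := by
    simp [PySem.Set.ofList_eq_foldl, List.foldl_append]
  rw [hset]
  by_cases hv : v ∈ l
  · have hadd : PySem.Set.add (PySem.Set.ofList l) v = PySem.Set.ofList l := by
      simp [PySem.Set.add, hv]
    rw [hadd]
    rw [pvSum_map_update v
        (fun k => PySem.Int.floordiv (((l ++ [v]).count k : Int) * (((l ++ [v]).count k : Int) - 1)) 2)
        (fun k => PySem.Int.floordiv ((l.count k : Int) * ((l.count k : Int) - 1)) 2)
        (PySem.Set.ofList l) (PySem.Set.nodup_ofList l) ((PySem.Set.mem_ofList l v).mpr hv)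
        (by intro k _ hkv
            have hck : (l ++ [v]).count k = l.count k := by
              simp [List.count_append, Ne.symm hkv]
            simp only [hck])]
    have hcv : (l ++ [v]).count v = l.count v + 1 := by simp
    simp only [hcv]
    push_cast
    have e : ((l.count v : Int) + 1) * ((l.count v : Int) + 1 - 1)
        = ((l.count v : Int) + 1) * (l.count v : Int) := by ring
    rw [e, pvComb_succ (l.count v : Int)]
    ring
  · have hadd : PySem.Set.add (PySem.Set.ofList l) v = PySem.Set.ofList l ++ [v] := by
      simp [PySem.Set.add, hv]
    rw [hadd, List.map_append, List.sum_append]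
    have hc0 : l.count v = 0 := List.count_eq_zero.mpr hv
    have hcong : ∀ k ∈ PySem.Set.ofList l,
        PySem.Int.floordiv (((l ++ [v]).count k : Int) * (((l ++ [v]).count k : Int) - 1)) 2
        = PySem.Int.floordiv ((l.count k : Int) * ((l.count k : Int) - 1)) 2 := by
      intro k hk
      have hkv : v ≠ k := by
        intro h; exact hv (h ▸ (PySem.Set.mem_ofList l k).mp hk)
      have hck : (l ++ [v]).count k = l.count k := by
        simp [List.count_append, hkv]
      simp only [hck]
    rw [List.map_congr_left hcong]
    have hcv : ((l ++ [v]).count v : Int) = 1 := by simp [hc0]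
    simp [hc0, PySem.Int.floordiv]

-- A's incremental pair count equals the combinatorial sum
theorem pvAns_eq (l : List Int) :
    (l.foldl (fun (st : Int × PySem.Dict Int Int) v =>
      (st.1 + st.2.getD v 0, st.2.modify v 0 (· + 1))) (0, PySem.Dict.empty)).1 = pvS l := by
  induction l using List.reverseRecOn with
  | nil => simp [pvS, PySem.Set.ofList_eq_foldl]
  | append_singleton l v ih =>
    rw [List.foldl_append]
    simp only [List.foldl_cons, List.foldl_nil]
    rw [pvA_snd, ← PySem.Dict.counter_eq_foldl, pvS_snoc, ← ih]
    simp [PySem.Dict.getD_counter]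

-- sums of a function over two duplicate-free lists with the same members agree
theorem pvSum_nodup_congr (f : Int → Int) (xs ys : List Int) (hx : xs.Nodup) (hy : ys.Nodup)
    (hmem : ∀ k, k ∈ xs ↔ k ∈ ys) : (xs.map f).sum = (ys.map f).sum := by
  have hperm : xs.Perm ys := by
    rw [List.perm_iff_count]
    intro a
    by_cases ha : a ∈ xs
    · rw [List.count_eq_one_of_mem hx ha, List.count_eq_one_of_mem hy ((hmem a).mp ha)]
    · rw [List.count_eq_zero.mpr ha, List.count_eq_zero.mpr (fun h => ha ((hmem a).mpr h))]
  exact (hperm.map f).sum_eq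

-- pvS is invariant under permutation
theorem pvS_perm (l l' : List Int) (h : l.Perm l') : pvS l = pvS l' := by
  unfold pvS
  have h1 : (PySem.Set.ofList l).map (fun k => pvC (l.count k : Int))
      = (PySem.Set.ofList l).map (fun k => pvC (l'.count k : Int)) := by
    apply List.map_congr_left; intro k _; rw [h.count_eq]
  rw [h1]
  exact pvSum_nodup_congr _ _ _ (PySem.Set.nodup_ofList l) (PySem.Set.nodup_ofList l')
    (fun k => by rw [PySem.Set.mem_ofList, PySem.Set.mem_ofList]; exact h.mem_iff)

-- peel one value out of pvS
theorem pvS_filter (l : List Int) (v : Int) (hv : v ∈ l) :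
    pvS l = pvC (l.count v : Int) + pvS (l.filter (fun k => decide (k ≠ v))) := by
  unfold pvS
  have hvD : v ∈ PySem.Set.ofList l := (PySem.Set.mem_ofList l v).mpr hv
  have hperm : (PySem.Set.ofList l).Perm (v :: (PySem.Set.ofList l).erase v) :=
    List.perm_cons_erase hvD
  rw [(hperm.map (fun k => pvC (l.count k : Int))).sum_eq]
  simp only [List.map_cons, List.sum_cons]
  congr 1
  have hcnt : ∀ k, k ≠ v → (l.filter (fun k => decide (k ≠ v))).count k = l.count k := by
    intro k hk
    rw [List.count_filter]
    simp [hk]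
  have h1 : ((PySem.Set.ofList l).erase v).map (fun k => pvC (l.count k : Int))
      = ((PySem.Set.ofList l).erase v).map
          (fun k => pvC ((l.filter (fun k => decide (k ≠ v))).count k : Int)) := by
    apply List.map_congr_left
    intro k hk
    have hkv : k ≠ v := ((PySem.Set.nodup_ofList l).mem_erase_iff.mp hk).1
    rw [hcnt k hkv]
  rw [h1]
  apply pvSum_nodup_congr
  · exact (PySem.Set.nodup_ofList l).erase v
  · exact PySem.Set.nodup_ofList _
  · intro k
    rw [(PySem.Set.nodup_ofList l).mem_erase_iff, PySem.Set.mem_ofList, PySem.Set.mem_ofList,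
        List.mem_filter]
    constructor
    · rintro ⟨hkv, hkl⟩; exact ⟨hkl, by simpa using hkv⟩
    · rintro ⟨hkl, hkv⟩; exact ⟨by simpa using hkv, hkl⟩

-- the run scan over a sorted tail counts C(c,2) over the value counts
theorem pvScan_aux (m : List Int) (hs : m.Pairwise (· ≤ ·)) : ∀ (prev ans run : Int),
    (∀ x ∈ m, prev ≤ x) →
    (m.foldl pvStepS (ans, run, prev)).1
      + pvC (m.foldl pvStepS (ans, run, prev)).2.1
    = ans + pvC (run + (m.count prev : Int)) + pvS (m.filter (fun k => decide (k ≠ prev))) := by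
  induction m with
  | nil =>
    intro prev ans run _
    simp [pvS, PySem.Set.ofList_eq_foldl]
  | cons x rest ih =>
    intro prev ans run hle
    have hxr : ∀ y ∈ rest, x ≤ y := fun y hy => List.rel_of_pairwise_cons hs hy
    by_cases hx : x = prev
    · subst hx
      simp only [List.foldl_cons, pvStepS, if_true]
      rw [ih (List.Pairwise.of_cons hs) x ans (run + 1) hxr]
      have : (rest.count x : Int) + 1 = ((x :: rest).count x : Int) := by
        rw [List.count_cons_self]; push_cast; ring
      rw [show run + 1 + (rest.count x : Int) = run + ((rest.count x : Int) + 1) by ring, this]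
      congr 2
      simp
    · have hpx : prev < x := lt_of_le_of_ne (hle x List.mem_cons_self) (Ne.symm hx)
      simp only [List.foldl_cons, pvStepS, if_neg hx]
      rw [ih (List.Pairwise.of_cons hs) x (ans + pvC run) 1 hxr]
      have hprev_rest : ∀ y ∈ rest, prev ≠ y := fun y hy => ne_of_lt (lt_of_lt_of_le hpx (hxr y hy))
      have hcount : (x :: rest).count prev = 0 := by
        rw [List.count_eq_zero]
        intro h
        rcases List.mem_cons.mp h with h | h
        · exact hx h.symm
        · exact hprev_rest prev h rfl
      have hfilter : (x :: rest).filter (fun k => decide (k ≠ prev)) = x :: rest := by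
        apply List.filter_eq_self.mpr
        intro a ha
        rcases List.mem_cons.mp ha with h | h
        · subst h; simp [hx]
        · simp [Ne.symm (hprev_rest a h)]
      rw [hcount, hfilter]
      simp only [Nat.cast_zero, add_zero]
      have hxmem : x ∈ x :: rest := List.mem_cons_self
      rw [pvS_filter (x :: rest) x hxmem]
      have hcx : ((x :: rest).count x : Int) = 1 + (rest.count x : Int) := by
        rw [List.count_cons_self]; push_cast; ring
      have hfx : (x :: rest).filter (fun k => decide (k ≠ x)) = rest.filter (fun k => decide (k ≠ x)) := by
        simp
      rw [hcx, hfx]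
      ring

-- the p = 2 / p = 5 branches: A's index loop equals B's enumerate/filter/sum, for any modulus m
theorem pvFoldIf (cond : Int → Prop) [DecidablePred cond] (g : Int → Int) : ∀ (l : List Int) (acc : Int),
    l.foldl (fun ans i => if cond i then ans + g i else ans) acc
    = acc + ((l.filter (fun i => decide (cond i))).map g).sum := by
  intro l
  induction l with
  | nil => intro acc; simp
  | cons x xs ih => intro acc; by_cases hx : cond x <;> simp [hx, ih]; ring

theorem pvSmall (cs : List Char) (m : Int) :
    (PySem.List.pyRange 0 (cs.length : Int) 1).foldl
      (fun ans i =>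
        if PySem.Int.mod (((PySem.List.pyGetD cs i ' ').toNat : Int) - 48) m = 0 then ans + (i + 1)
        else ans) 0
    = (((PySem.List.enumerate cs).filter
        (fun q => decide (PySem.Int.mod ((q.2.toNat : Int) - 48) m = 0))).map
        (fun q => q.1 + 1)).sum := by
  rw [pvFoldIf (fun i => PySem.Int.mod (((PySem.List.pyGetD cs i ' ').toNat : Int) - 48) m = 0)
      (fun i => i + 1)]
  rw [PySem.List.enumerate_eq_map_pyRange cs ' ', List.filter_map, List.map_map]
  simp [PySem.List.len, Function.comp_def]

-- the general branch: A's dict pipeline equals B's sort-and-run-scan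
theorem pvGen (cs : List Char) (p : Int) :
    ((((PySem.List.pyRange ((cs.length : Int) - 1) (-1) (-1)).foldl
        (fun st i => pvStepA p st (pvDig (PySem.List.pyGetD cs i ' '))) ([], 1)).1.foldl
        (fun (c : List Int) v => c ++ [PySem.Int.mod (PySem.List.pyGetD c (-1) 0 + v) p]) [0]).foldl
        (fun (st : Int × PySem.Dict Int Int) v =>
          (st.1 + st.2.getD v 0, st.2.modify v 0 (· + 1))) (0, PySem.Dict.empty)).1
    = (let rl := (cs.reverse.foldl (fun st ch => pvStepR p st (pvDig ch)) ([0], 0, 1)).1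
       let rems := PySem.List.sorted rl (fun x => x) false
       let fin := (rems.drop 1).foldl pvStepS (0, 1, PySem.List.pyGetD rems 0 0)
       fin.1 + pvC fin.2.1) := by
  have h0 : PySem.List.pyRange ((cs.length : Int) - 1) (-1) (-1)
      = (PySem.List.pyRange 0 (cs.length : Int) 1).reverse := by
    rw [PySem.List.pyRange_neg_one_eq_reverse]; norm_num
  have hmap : (PySem.List.pyRange 0 (cs.length : Int) 1).reverse.map
      (fun i => pvDig (PySem.List.pyGetD cs i ' ')) = cs.reverse.map pvDig := by
    rw [List.map_reverse, List.map_reverse]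
    congr 1
    rw [show (fun i => pvDig (PySem.List.pyGetD cs i ' '))
        = pvDig ∘ (fun j => PySem.List.pyGetD cs j ' ') from rfl, ← List.map_map]
    congr 1
    exact PySem.List.map_pyGetD_pyRange_zero' cs ' '
  have hA1 : ((PySem.List.pyRange ((cs.length : Int) - 1) (-1) (-1)).foldl
      (fun st i => pvStepA p st (pvDig (PySem.List.pyGetD cs i ' '))) (([] : List Int), 1)).1
      = pvAL p (cs.reverse.map pvDig) 1 := by
    rw [h0, ← List.foldl_map (f := fun i => pvDig (PySem.List.pyGetD cs i ' ')) (g := pvStepA p), hmap]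
    exact pvAL_foldl p (cs.reverse.map pvDig) [] 1
  rw [hA1]
  have hA2 : (pvAL p (cs.reverse.map pvDig) 1).foldl
      (fun (c : List Int) v => c ++ [PySem.Int.mod (PySem.List.pyGetD c (-1) 0 + v) p]) [0]
      = 0 :: pvRL p 0 1 (cs.reverse.map pvDig) := by
    have := pvCL_foldl p (pvAL p (cs.reverse.map pvDig) 1) [] 0
    simpa [pvCL_aL] using this
  rw [hA2, pvAns_eq]
  -- B's remainder list is the same list
  have hB1 : (cs.reverse.foldl (fun st ch => pvStepR p st (pvDig ch)) ([0], 0, 1)).1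
      = 0 :: pvRL p 0 1 (cs.reverse.map pvDig) := by
    rw [← List.foldl_map (f := pvDig) (g := pvStepR p)]
    exact pvRems_foldl p (cs.reverse.map pvDig) [0] 0 1
  simp only [hB1]
  -- the sorted list is a nonempty Pairwise-(≤) permutation of it
  set rl := 0 :: pvRL p 0 1 (cs.reverse.map pvDig) with hrl
  have hperm : (PySem.List.sorted rl (fun x => x) false).Perm rl := PySem.List.sorted_perm rl _ _
  have hpair : (PySem.List.sorted rl (fun x => x) false).Pairwise (fun a b => a ≤ b) := by
    simpa using PySem.List.sorted_pairwise rl (fun x => x)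
  have hne : PySem.List.sorted rl (fun x => x) false ≠ [] := by
    intro h
    have := hperm.length_eq
    rw [h] at this
    simp [hrl] at this
  obtain ⟨h, tl, hht⟩ := List.exists_cons_of_ne_nil hne
  rw [hht] at hperm hpair ⊢
  have hget : PySem.List.pyGetD (h :: tl) 0 0 = h := by
    simp [PySem.List.pyGetD]
  simp only [List.drop_succ_cons, List.drop_zero, hget]
  have htl_pair : tl.Pairwise (· ≤ ·) := List.Pairwise.of_cons hpair
  have htl_le : ∀ x ∈ tl, h ≤ x := fun x hx => List.rel_of_pairwise_cons hpair hx
  rw [pvScan_aux tl htl_pair h 0 1 htl_le]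
  have hsum : pvS rl = pvS (h :: tl) := (pvS_perm _ _ hperm).symm
  rw [hsum, pvS_filter (h :: tl) h List.mem_cons_self]
  have hcx : ((h :: tl).count h : Int) = 1 + (tl.count h : Int) := by
    rw [List.count_cons_self]; push_cast; ring
  have hfx : (h :: tl).filter (fun k => decide (k ≠ h)) = tl.filter (fun k => decide (k ≠ h)) := by
    simp
  rw [hcx, hfx]
  ring

-- ===== VERDICT (by name: the statement is the Claim_ definition above) =====
theorem cnt_multiple_spec : Claim_equal_cnt_multiple := by
  intro s p _ _
  unfold Spec_cnt_multiple cnt_multiple cnt_multiple_alt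
  by_cases h2 : p = 2
  · subst h2
    rw [if_neg (by norm_num), if_pos rfl, if_pos (Or.inl rfl)]
    simp only [PySem.Str.len_eq]
    exact pvSmall s.toList 2
  · by_cases h5 : p = 5
    · subst h5
      rw [if_neg (by norm_num), if_neg (by norm_num), if_pos (Or.inr rfl)]
      simp only [PySem.Str.len_eq]
      exact pvSmall s.toList 5
    · rw [if_pos (⟨h2, h5⟩ : ¬p = 2 ∧ ¬p = 5), if_neg (by tauto : ¬(p = 2 ∨ p = 5))]
      simp only [PySem.Str.len_eq]
      exact pvGen s.toList p
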